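-- pv_equiv track=rewrite | github.com/petrushev/nlmk | nlmk/ngramgen.py | multi_ngram
-- ===== SOURCE A (Python) =====
-- from collections import deque
--
-- def multi_ngram(tokens, top_n):
--     """Create ngram counted dictionaries up to `top_n` ngram"""
--     history = [deque() for _ in range(top_n-1)]
--
--     res = [{} for _ in range(top_n)]
--     for tk in tokens:
--         if not tk.isalpha():
--             history = [deque() for _ in range(top_n-1)]
--             continue
--         tk = tk.lower()
--
--         res[0][(tk,)] = res[0].get((tk,), 0) + 1
--
--         for i in range(top_n-1):
--             history[i].append(tk)
--             if len(history[i])==i+2: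
--                 tpl = tuple(history[i])
--                 res[i+1][tpl] = res[i+1].get(tpl, 0) + 1
--                 history[i].popleft()
--
--     return res
-- ===== SOURCE B (Python) =====
-- def multi_ngram(tokens, top_n):
--     """Create ngram counted dictionaries up to `top_n` ngram"""
--     res = [{} for _ in range(top_n)]
--
--     def flush(run):
--         for L in range(1, top_n + 1):
--             d = res[L - 1]
--             for i in range(len(run) - L + 1):
--                 tpl = tuple(run[i:i + L])
--                 d[tpl] = d.get(tpl, 0) + 1
--
--     run = []
--     for tk in tokens:
--         if tk.isalpha():
--             run.append(tk.lower())
--         else: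
--             flush(run)
--             run = []
--     flush(run)
--     return res
-- ===== Notes on version B (the rewrite author's own statement) =====
-- stated objective: simpler
-- what changed: B replaces A's top_n-1 incrementally maintained sliding-window deques by accumulating each maximal run of consecutive alpha tokens into a buffer and, at each run boundary (and once at the end), counting all slices run[i:i+L] for L in 1..top_n.
import Mathlib
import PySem

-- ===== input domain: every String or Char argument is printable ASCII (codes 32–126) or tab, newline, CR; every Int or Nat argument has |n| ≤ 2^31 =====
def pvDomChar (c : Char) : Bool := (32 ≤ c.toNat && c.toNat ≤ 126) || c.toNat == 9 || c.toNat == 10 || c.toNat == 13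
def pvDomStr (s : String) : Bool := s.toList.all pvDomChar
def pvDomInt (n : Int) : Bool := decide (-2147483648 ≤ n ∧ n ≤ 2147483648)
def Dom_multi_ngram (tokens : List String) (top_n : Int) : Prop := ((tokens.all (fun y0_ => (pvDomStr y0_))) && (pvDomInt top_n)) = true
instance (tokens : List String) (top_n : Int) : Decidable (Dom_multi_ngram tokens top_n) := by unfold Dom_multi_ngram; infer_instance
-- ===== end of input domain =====

-- B groups consecutive alpha tokens into runs and counts each run's slices per length, instead of A's per-token sliding deques; objective: simpler decomposition (not claimed faster).


-- ===== PORT A =====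
def multi_ngram (tokens : List String) (top_n : Int) : List (List (List String × Int)) :=
  let history0 : List (List String) := (PySem.List.pyRange 0 (top_n - 1) 1).map (fun _ => ([] : List String))
  let res0 : List (PySem.Dict (List String) Int) :=
    (PySem.List.pyRange 0 top_n 1).map (fun _ => (PySem.Dict.empty : PySem.Dict (List String) Int))
  let st := tokens.foldl
    (fun (st : List (List String) × List (PySem.Dict (List String) Int)) tk =>
      if !PySem.Str.strIsalpha tk then
        ((PySem.List.pyRange 0 (top_n - 1) 1).map (fun _ => ([] : List String)), st.2)
      else
        let tk := PySem.Str.lower tk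
        let d0 := PySem.List.pyGetD st.2 0 PySem.Dict.empty
        let res := PySem.List.pySetD st.2 0 (d0.insert [tk] (d0.getD [tk] 0 + 1))
        (PySem.List.pyRange 0 (top_n - 1) 1).foldl
          (fun (st2 : List (List String) × List (PySem.Dict (List String) Int)) i =>
            let h := PySem.List.pyGetD st2.1 i [] ++ [tk]
            if ((h.length : Int) == i + 2) then
              let tpl := h
              let d := PySem.List.pyGetD st2.2 (i + 1) PySem.Dict.empty
              (PySem.List.pySetD st2.1 i h.tail,
               PySem.List.pySetD st2.2 (i + 1) (d.insert tpl (d.getD tpl 0 + 1)))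
            else
              (PySem.List.pySetD st2.1 i h, st2.2))
          (st.1, res))
    (history0, res0)
  st.2.map (fun d => d.items)

-- ===== PORT B =====
-- helper: the nested `flush` of Source B (res and top_n are closure variables there, parameters here)
def pyFlushRun (top_n : Int) (res : List (PySem.Dict (List String) Int)) (run : List String) :
    List (PySem.Dict (List String) Int) :=
  (PySem.List.pyRange 1 (top_n + 1) 1).foldl
    (fun res L =>
      let d := PySem.List.pyGetD res (L - 1) PySem.Dict.empty
      let d := (PySem.List.pyRange 0 ((run.length : Int) - L + 1) 1).foldl
        (fun d i =>
          let tpl := PySem.List.slice run (some i) (some (i + L))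
          d.insert tpl (d.getD tpl 0 + 1)) d
      PySem.List.pySetD res (L - 1) d) res

def multi_ngram_alt (tokens : List String) (top_n : Int) : List (List (List String × Int)) :=
  let res0 : List (PySem.Dict (List String) Int) :=
    (PySem.List.pyRange 0 top_n 1).map (fun _ => (PySem.Dict.empty : PySem.Dict (List String) Int))
  let st := tokens.foldl
    (fun (st : List (PySem.Dict (List String) Int) × List String) tk =>
      if PySem.Str.strIsalpha tk then (st.1, st.2 ++ [PySem.Str.lower tk])
      else (pyFlushRun top_n st.1 st.2, []))
    (res0, [])
  (pyFlushRun top_n st.1 st.2).map (fun d => d.items)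

-- ===== PRECONDITION & SPEC =====
-- Pre_ excludes only the inputs where A raises IndexError: top_n < 1 while some token is
-- alphabetic (then `res[0][(tk,)] = ...` indexes the empty list `res`).
def Pre_multi_ngram (tokens : List String) (top_n : Int) : Prop :=
  1 ≤ top_n ∨ ∀ t ∈ tokens, PySem.Str.strIsalpha t = false
instance (tokens : List String) (top_n : Int) : Decidable (Pre_multi_ngram tokens top_n) := by
  unfold Pre_multi_ngram; infer_instance

def pvWitness_multi_ngram : List String × Int := (["Ab", "x1", "cd", "ab"], 2)

def Spec_multi_ngram (tokens : List String) (top_n : Int) (out : List (List (List String × Int))) : Prop :=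
  out = multi_ngram_alt tokens top_n
instance (tokens : List String) (top_n : Int) (out : List (List (List String × Int))) :
    Decidable (Spec_multi_ngram tokens top_n out) := by unfold Spec_multi_ngram; infer_instance

-- ===== CLAIM (what is proved, stated in full; the proofs are below) =====
def Claim_equal_multi_ngram : Prop := ∀ (tokens : List String) (top_n : Int),
  Dom_multi_ngram tokens top_n → Pre_multi_ngram tokens top_n →
  Spec_multi_ngram tokens top_n (multi_ngram tokens top_n)

-- ===== LEMMAS AND PROOFS =====

-- abbreviation for the dictionary type
abbrev pvDic : Type := PySem.Dict (List String) Int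

-- proof-side copies of the two loop bodies (definitionally equal to the inline lambdas of the ports)
def pvStepA (top_n : Int)
    (st : List (List String) × List pvDic) (tk : String) :
    List (List String) × List pvDic :=
  if !PySem.Str.strIsalpha tk then
    ((PySem.List.pyRange 0 (top_n - 1) 1).map (fun _ => ([] : List String)), st.2)
  else
    let tk := PySem.Str.lower tk
    let d0 := PySem.List.pyGetD st.2 0 PySem.Dict.empty
    let res := PySem.List.pySetD st.2 0 (d0.insert [tk] (d0.getD [tk] 0 + 1))
    (PySem.List.pyRange 0 (top_n - 1) 1).foldl
      (fun (st2 : List (List String) × List pvDic) i =>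
        let h := PySem.List.pyGetD st2.1 i [] ++ [tk]
        if ((h.length : Int) == i + 2) then
          let tpl := h
          let d := PySem.List.pyGetD st2.2 (i + 1) PySem.Dict.empty
          (PySem.List.pySetD st2.1 i h.tail,
           PySem.List.pySetD st2.2 (i + 1) (d.insert tpl (d.getD tpl 0 + 1)))
        else
          (PySem.List.pySetD st2.1 i h, st2.2))
      (st.1, res)

def pvStepB (top_n : Int)
    (st : List pvDic × List String) (tk : String) : List pvDic × List String :=
  if PySem.Str.strIsalpha tk then (st.1, st.2 ++ [PySem.Str.lower tk])
  else (pyFlushRun top_n st.1 st.2, [])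

def pvRes0 (top_n : Int) : List pvDic :=
  (PySem.List.pyRange 0 top_n 1).map (fun _ => (PySem.Dict.empty : pvDic))

lemma multi_ngram_eq (tokens : List String) (top_n : Int) :
    multi_ngram tokens top_n =
      ((tokens.foldl (pvStepA top_n)
        ((PySem.List.pyRange 0 (top_n - 1) 1).map (fun _ => ([] : List String)), pvRes0 top_n)).2).map
        (fun d => d.items) := rfl

lemma multi_ngram_alt_eq (tokens : List String) (top_n : Int) :
    multi_ngram_alt tokens top_n =
      (pyFlushRun top_n (tokens.foldl (pvStepB top_n) (pvRes0 top_n, [])).1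
        (tokens.foldl (pvStepB top_n) (pvRes0 top_n, [])).2).map (fun d => d.items) := rfl

-- counting machinery
def pvIncr (d : pvDic) (k : List String) : pvDic := d.insert k (d.getD k 0 + 1)
def pvCount (ks : List (List String)) (d : pvDic) : pvDic := ks.foldl pvIncr d
def pvBulk (K : Nat → List (List String)) (res : List pvDic) : List pvDic :=
  res.mapIdx (fun j d => pvCount (K j) d)
def pvLastN (m : Nat) (l : List String) : List String := l.drop (l.length - m)
def pvWin (L : Nat) (r : List String) : List (List String) :=
  (List.range (r.length + 1 - L)).map (fun i => (r.drop i).take L)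
def pvHist (n : Nat) (buf : List String) : List (List String) :=
  (List.range (n - 1)).map (fun i => pvLastN (i + 1) buf)
def pvTokK (buf : List String) (t : String) (j : Nat) : List (List String) :=
  if j ≤ buf.length then [pvLastN (j + 1) (buf ++ [t])] else []
def pvMidH (n : Nat) (buf : List String) (t' : String) (m : Nat) : List (List String) :=
  (List.range (n - 1)).map (fun i => if i < m then pvLastN (i + 1) (buf ++ [t']) else pvLastN (i + 1) buf)
def pvMidK (buf : List String) (t' : String) (m : Nat) (j : Nat) : List (List String) :=
  if j ≤ m ∧ j ≤ buf.length then [pvLastN (j + 1) (buf ++ [t'])] else []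

def pvLastRun : List String → List String → List String
  | [], buf => buf
  | t :: ts, buf =>
      if PySem.Str.strIsalpha t then pvLastRun ts (buf ++ [PySem.Str.lower t]) else pvLastRun ts []

def pvNewK : List String → List String → Nat → List (List String)
  | [], _, _ => []
  | t :: ts, buf, j =>
      if PySem.Str.strIsalpha t then
        pvTokK buf (PySem.Str.lower t) j ++ pvNewK ts (buf ++ [PySem.Str.lower t]) j
      else pvNewK ts [] j

def pvFlushedK : List String → List String → Nat → List (List String)
  | [], _, _ => []
  | t :: ts, buf, j =>
      if PySem.Str.strIsalpha t then pvFlushedK ts (buf ++ [PySem.Str.lower t]) j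
      else pvWin (j + 1) buf ++ pvFlushedK ts [] j

lemma length_pvBulk (K : Nat → List (List String)) (res : List pvDic) :
    (pvBulk K res).length = res.length := by
  simp [pvBulk]

lemma getElem_pvBulk (K : Nat → List (List String)) (res : List pvDic) (j : Nat)
    (h : j < (pvBulk K res).length) :
    (pvBulk K res)[j] = pvCount (K j) (res[j]'(by simpa [length_pvBulk] using h)) := by
  simp [pvBulk, List.getElem_mapIdx]

lemma pvCount_append (a b : List (List String)) (d : pvDic) :
    pvCount (a ++ b) d = pvCount b (pvCount a d) := by
  simp [pvCount, List.foldl_append]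

lemma pvBulk_congr {K1 K2 : Nat → List (List String)} (res : List pvDic)
    (h : ∀ j < res.length, K1 j = K2 j) : pvBulk K1 res = pvBulk K2 res := by
  apply List.ext_getElem
  · simp [length_pvBulk]
  · intro i h1 h2
    rw [getElem_pvBulk, getElem_pvBulk, h i (by simpa [length_pvBulk] using h1)]

lemma pvBulk_eq_self {K : Nat → List (List String)} (res : List pvDic)
    (h : ∀ j < res.length, K j = []) : pvBulk K res = res := by
  apply List.ext_getElem
  · simp [length_pvBulk]
  · intro i h1 h2
    rw [getElem_pvBulk, h i (by simpa [length_pvBulk] using h1)]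
    rfl

lemma pvBulk_bulk (K1 K2 : Nat → List (List String)) (res : List pvDic) :
    pvBulk K2 (pvBulk K1 res) = pvBulk (fun j => K1 j ++ K2 j) res := by
  apply List.ext_getElem
  · simp [length_pvBulk]
  · intro i h1 h2
    rw [getElem_pvBulk, getElem_pvBulk, getElem_pvBulk, pvCount_append]

lemma pvBulk_update (K : Nat → List (List String)) (res : List pvDic) (j0 : Nat)
    (hj : j0 < res.length) (ks : List (List String)) :
    (pvBulk K res).set j0 (pvCount ks (pvCount (K j0) res[j0])) =
      pvBulk (fun j => if j = j0 then K j ++ ks else K j) res := by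
  apply List.ext_getElem
  · simp [length_pvBulk]
  · intro i h1 h2
    rw [List.getElem_set, getElem_pvBulk]
    by_cases hi : i = j0
    · subst hi
      simp only [if_true, getElem_pvBulk, ← pvCount_append]
    · rw [if_neg (fun h => hi h.symm), getElem_pvBulk, if_neg hi]

lemma length_pvLastN (m : Nat) (l : List String) : (pvLastN m l).length = min m l.length := by
  simp [pvLastN]; omega

lemma pvLastN_all {m : Nat} {l : List String} (h : l.length ≤ m) : pvLastN m l = l := by
  simp [pvLastN, Nat.sub_eq_zero_of_le h]

lemma pvLastN_snoc {m : Nat} {l : List String} (h : m ≤ l.length) (t : String) :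
    pvLastN (m + 1) (l ++ [t]) = pvLastN m l ++ [t] := by
  unfold pvLastN
  rw [List.length_append]
  simp only [List.length_cons, List.length_nil]
  rw [show l.length + 1 - (m + 1) = l.length - m by omega,
    List.drop_append_of_le_length (by omega)]

lemma pvLastN_zero (l : List String) : pvLastN 0 l = [] := by
  simp [pvLastN]

lemma pvWin_nil (j : Nat) : pvWin (j + 1) [] = [] := by
  simp [pvWin]

lemma pvWin_snoc (buf : List String) (t : String) (j : Nat) :
    pvWin (j + 1) (buf ++ [t]) = pvWin (j + 1) buf ++ pvTokK buf t j := by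
  unfold pvWin pvTokK
  by_cases hj : j ≤ buf.length
  · rw [if_pos hj]
    rw [show (buf ++ [t]).length + 1 - (j + 1) = (buf.length + 1 - (j + 1)) + 1 by simp; omega,
      List.range_succ, List.map_append]
    congr 1
    · apply List.map_congr_left
      intro i hi
      rw [List.mem_range] at hi
      rw [List.drop_append_of_le_length (by omega),
        List.take_append_of_le_length (by simp; omega)]
    · simp only [List.map_cons, List.map_nil]
      congr 1
      rw [List.take_of_length_le (by simp; omega)]
      unfold pvLastN
      congr 1
      show buf.length + 1 - (j + 1) = (buf ++ [t]).length - (j + 1)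
      simp
  · rw [if_neg hj]
    rw [show (buf ++ [t]).length + 1 - (j + 1) = 0 by simp; omega,
      show buf.length + 1 - (j + 1) = 0 by omega]
    simp

lemma pvHist0 (n : Nat) (hn : 1 ≤ n) :
    ((PySem.List.pyRange 0 ((n : Int) - 1) 1).map (fun _ => ([] : List String))) = pvHist n [] := by
  unfold pvHist
  rw [show ((n : Int) - 1) = ((n - 1 : Nat) : Int) by omega, PySem.List.pyRange_zero_nat,
    List.map_map]
  apply List.map_congr_left
  intro a _
  simp [pvLastN]

lemma pvCount_nil (d : pvDic) : pvCount [] d = d := rfl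

lemma pvCount_single (d : pvDic) (k : List String) : pvCount [k] d = pvIncr d k := rfl

lemma pvMidH_zero (n : Nat) (buf : List String) (t' : String) :
    pvMidH n buf t' 0 = pvHist n buf := by
  simp [pvMidH, pvHist]

lemma pvMidH_full (n : Nat) (buf : List String) (t' : String) :
    pvMidH n buf t' (n - 1) = pvHist n (buf ++ [t']) := by
  unfold pvMidH pvHist
  apply List.map_congr_left
  intro i hi
  rw [List.mem_range] at hi
  rw [if_pos hi]

lemma pvMidH_set (n : Nat) (buf : List String) (t' : String) (m : Nat) :
    (pvMidH n buf t' m).set m (pvLastN (m + 1) (buf ++ [t'])) = pvMidH n buf t' (m + 1) := by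
  apply List.ext_getElem
  · simp [pvMidH]
  · intro i h1 h2
    simp only [List.getElem_set]
    simp only [pvMidH, List.getElem_map, List.getElem_range]
    by_cases hi : m = i
    · subst hi; rw [if_pos rfl, if_pos (by omega)]
    · rw [if_neg hi]
      by_cases hi2 : i < m
      · rw [if_pos hi2, if_pos (by omega)]
      · rw [if_neg hi2, if_neg (by omega)]

lemma pvAstep1 (n : Nat) (buf : List String) (t' : String) (res : List pvDic) (m : Nat)
    (hres : res.length = n) (hmlt : m < n - 1) :
    (let h := PySem.List.pyGetD (pvMidH n buf t' m) (m : Int) [] ++ [t']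
     if ((h.length : Int) == (m : Int) + 2) then
       let tpl := h
       let d := PySem.List.pyGetD (pvBulk (pvMidK buf t' m) res) ((m : Int) + 1) PySem.Dict.empty
       (PySem.List.pySetD (pvMidH n buf t' m) (m : Int) h.tail,
        PySem.List.pySetD (pvBulk (pvMidK buf t' m) res) ((m : Int) + 1)
          (d.insert tpl (d.getD tpl 0 + 1)))
     else
       (PySem.List.pySetD (pvMidH n buf t' m) (m : Int) h, pvBulk (pvMidK buf t' m) res))
    = (pvMidH n buf t' (m + 1), pvBulk (pvMidK buf t' (m + 1)) res) := by
  have hget : PySem.List.pyGetD (pvMidH n buf t' m) (m : Int) [] = pvLastN (m + 1) buf := by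
    rw [PySem.List.pyGetD_natCast, List.getD_eq_getElem _ _ (by simp [pvMidH]; omega)]
    simp [pvMidH]
  have hlen : (pvLastN (m + 1) buf ++ [t']).length = min (m + 1) buf.length + 1 := by
    simp [length_pvLastN]
  simp only [hget]
  by_cases hb : m < buf.length
  · have hc : (((pvLastN (m + 1) buf ++ [t']).length : Int) == (m : Int) + 2) = true := by
      rw [hlen]; simp only [beq_iff_eq]; push_cast; omega
    simp only [hc, if_true]
    have htail : (pvLastN (m + 1) buf ++ [t']).tail = pvLastN (m + 1) (buf ++ [t']) := by
      rw [List.tail_append_of_ne_nil (by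
        apply List.ne_nil_of_length_pos
        rw [length_pvLastN]
        omega)]
      rw [pvLastN_snoc (by omega)]
      congr 1
      unfold pvLastN
      rw [List.tail_drop]
      congr 1
      omega
    refine congrArg₂ Prod.mk ?_ ?_
    · rw [PySem.List.pySetD_natCast, htail, pvMidH_set n buf t' m]
    · rw [show ((m : Int) + 1) = ((m + 1 : Nat) : Int) by push_cast; ring,
        PySem.List.pyGetD_natCast,
        List.getD_eq_getElem _ _ (by rw [length_pvBulk]; omega),
        getElem_pvBulk, PySem.List.pySetD_natCast]
      rw [show pvMidK buf t' m (m + 1) = [] by simp [pvMidK]]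
      rw [pvCount_nil]
      have hupd := pvBulk_update (pvMidK buf t' m) res (m + 1) (by omega)
        [pvLastN (m + 1) buf ++ [t']]
      rw [show pvMidK buf t' m (m + 1) = [] by simp [pvMidK], pvCount_nil, pvCount_single] at hupd
      rw [show (res[m + 1]'(by omega)).insert (pvLastN (m + 1) buf ++ [t'])
            ((res[m + 1]'(by omega)).getD (pvLastN (m + 1) buf ++ [t']) 0 + 1)
          = pvIncr (res[m + 1]'(by omega)) (pvLastN (m + 1) buf ++ [t']) from rfl]
      rw [hupd]
      apply pvBulk_congr
      intro j hj
      by_cases hjm : j = m + 1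
      · subst hjm
        rw [if_pos rfl]
        rw [show pvMidK buf t' m (m + 1) = [] by simp [pvMidK], List.nil_append]
        rw [show pvMidK buf t' (m + 1) (m + 1) =
            [pvLastN (m + 2) (buf ++ [t'])] by simp [pvMidK]; omega]
        rw [pvLastN_snoc (by omega)]
      · rw [if_neg hjm]
        unfold pvMidK
        by_cases hjb : j ≤ buf.length
        · by_cases hjm2 : j ≤ m
          · rw [if_pos ⟨hjm2, hjb⟩, if_pos ⟨by omega, hjb⟩]
          · rw [if_neg (by omega), if_neg (by omega)]
        · rw [if_neg (by omega), if_neg (by omega)]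
  · have hc : (((pvLastN (m + 1) buf ++ [t']).length : Int) == (m : Int) + 2) = false := by
      rw [hlen]; simp only [beq_eq_false_iff_ne]; push_cast; omega
    simp only [hc, Bool.false_eq_true, if_false]
    refine congrArg₂ Prod.mk ?_ ?_
    · rw [PySem.List.pySetD_natCast,
        show pvLastN (m + 1) buf = buf from pvLastN_all (by omega),
        show buf ++ [t'] = pvLastN (m + 1) (buf ++ [t']) from
          (pvLastN_all (by simp; omega)).symm,
        pvMidH_set n buf t' m]
    · apply pvBulk_congr
      intro j hj
      unfold pvMidK
      by_cases hjb : j ≤ buf.length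
      · by_cases hjm2 : j ≤ m
        · rw [if_pos ⟨hjm2, hjb⟩, if_pos ⟨by omega, hjb⟩]
        · rw [if_neg (by omega), if_neg (by omega)]
      · rw [if_neg (by omega), if_neg (by omega)]

lemma pvAinner (buf : List String) (t' : String) (res : List pvDic) (n : Nat)
    (hres : res.length = n) (m : Nat) (hm : m ≤ n - 1) :
    (List.range m).foldl
      (fun (st2 : List (List String) × List pvDic) (k : Nat) =>
        let h := PySem.List.pyGetD st2.1 (k : Int) [] ++ [t']
        if ((h.length : Int) == (k : Int) + 2) then
          let tpl := h
          let d := PySem.List.pyGetD st2.2 ((k : Int) + 1) PySem.Dict.empty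
          (PySem.List.pySetD st2.1 (k : Int) h.tail,
           PySem.List.pySetD st2.2 ((k : Int) + 1) (d.insert tpl (d.getD tpl 0 + 1)))
        else
          (PySem.List.pySetD st2.1 (k : Int) h, st2.2))
      (pvMidH n buf t' 0, pvBulk (pvMidK buf t' 0) res)
    = (pvMidH n buf t' m, pvBulk (pvMidK buf t' m) res) := by
  induction m with
  | zero => rfl
  | succ m ih =>
    rw [List.range_succ, List.foldl_append, ih (by omega)]
    simp only [List.foldl_cons, List.foldl_nil]
    exact pvAstep1 n buf t' res m hres (by omega)

lemma pvAstep (n : Nat) (hn : 1 ≤ n) (buf : List String) (res : List pvDic)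
    (hres : res.length = n) (tk : String) (halpha : PySem.Str.strIsalpha tk = true) :
    pvStepA (n : Int) (pvHist n buf, res) tk =
      (pvHist n (buf ++ [PySem.Str.lower tk]), pvBulk (pvTokK buf (PySem.Str.lower tk)) res) := by
  have hne : res ≠ [] := by intro h; rw [h] at hres; simp at hres; omega
  unfold pvStepA
  rw [halpha]
  simp only [Bool.not_true, Bool.false_eq_true, if_false]
  have h0bulk : PySem.List.pySetD res 0
      ((PySem.List.pyGetD res 0 PySem.Dict.empty).insert [PySem.Str.lower tk]
        ((PySem.List.pyGetD res 0 PySem.Dict.empty).getD [PySem.Str.lower tk] 0 + 1)) =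
      pvBulk (pvMidK buf (PySem.Str.lower tk) 0) res := by
    rw [PySem.List.pyGetD_zero, List.getD_eq_getElem _ _ (by omega),
      PySem.List.pySetD_of_nonneg _ _ (by norm_num)]
    have hupd := pvBulk_update (fun _ => []) res 0 (by omega) [[PySem.Str.lower tk]]
    rw [pvBulk_eq_self res (fun _ _ => rfl), pvCount_nil, pvCount_single] at hupd
    rw [show (Int.toNat 0) = 0 from rfl,
      show (res[0]'(by omega)).insert [PySem.Str.lower tk]
          ((res[0]'(by omega)).getD [PySem.Str.lower tk] 0 + 1)
        = pvIncr (res[0]'(by omega)) [PySem.Str.lower tk] from rfl, hupd]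
    apply pvBulk_congr
    intro j hj
    by_cases hj0 : j = 0
    · subst hj0
      rw [if_pos rfl, List.nil_append,
        show pvMidK buf (PySem.Str.lower tk) 0 0 = [pvLastN 1 (buf ++ [PySem.Str.lower tk])] by
          simp [pvMidK]]
      rw [show pvLastN 1 (buf ++ [PySem.Str.lower tk]) =
          pvLastN 0 buf ++ [PySem.Str.lower tk] from pvLastN_snoc (by omega) _, pvLastN_zero]
      simp
    · rw [if_neg hj0, show pvMidK buf (PySem.Str.lower tk) 0 j = [] by simp [pvMidK]; omega]
  rw [h0bulk]
  rw [show ((n : Int) - 1) = ((n - 1 : Nat) : Int) by omega, PySem.List.pyRange_zero_nat,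
    List.foldl_map]
  have hinner := pvAinner buf (PySem.Str.lower tk) res n hres (n - 1) le_rfl
  rw [pvMidH_zero, pvMidH_full] at hinner
  have hKfin : pvBulk (pvMidK buf (PySem.Str.lower tk) (n - 1)) res =
      pvBulk (pvTokK buf (PySem.Str.lower tk)) res := by
    apply pvBulk_congr
    intro j hj
    unfold pvMidK pvTokK
    by_cases hjb : j ≤ buf.length
    · rw [if_pos ⟨by omega, hjb⟩, if_pos hjb]
    · rw [if_neg (by omega), if_neg hjb]
  rw [hKfin] at hinner
  exact hinner

lemma pvAfold (n : Nat) (hn : 1 ≤ n) :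
    ∀ (tokens : List String) (buf : List String) (res : List pvDic), res.length = n →
      tokens.foldl (pvStepA (n : Int)) (pvHist n buf, res) =
        (pvHist n (pvLastRun tokens buf), pvBulk (pvNewK tokens buf) res) := by
  intro tokens
  induction tokens with
  | nil =>
    intro buf res hres
    simp only [List.foldl_nil, pvLastRun]
    refine congrArg₂ Prod.mk rfl ?_
    exact (pvBulk_eq_self res (fun j _ => by simp [pvNewK])).symm
  | cons t ts ih =>
    intro buf res hres
    simp only [List.foldl_cons]
    by_cases ha : PySem.Str.strIsalpha t
    · rw [pvAstep n hn buf res hres t ha]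
      rw [ih (buf ++ [PySem.Str.lower t]) _ (by rw [length_pvBulk]; exact hres)]
      rw [pvBulk_bulk]
      refine congrArg₂ Prod.mk ?_ ?_
      · simp only [pvLastRun, ha, if_true]
      · apply pvBulk_congr
        intro j hj
        simp only [pvNewK, ha, if_true]
    · have ha' : PySem.Str.strIsalpha t = false := by simpa using ha
      rw [show pvStepA (n : Int) (pvHist n buf, res) t =
          ((PySem.List.pyRange 0 ((n : Int) - 1) 1).map (fun _ => ([] : List String)), res) by
        unfold pvStepA; rw [ha']; rfl]
      rw [pvHist0 n hn, ih [] res hres]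
      refine congrArg₂ Prod.mk ?_ ?_
      · simp only [pvLastRun, ha', Bool.false_eq_true, if_false]
      · apply pvBulk_congr
        intro j hj
        simp only [pvNewK, ha', Bool.false_eq_true, if_false]

def pvWinK (r : List String) (m : Nat) (j : Nat) : List (List String) :=
  if j < m then pvWin (j + 1) r else []

lemma pvFlushInner (r : List String) (m : Nat) (d : pvDic) :
    (PySem.List.pyRange 0 ((r.length : Int) - (1 + (m : Int)) + 1) 1).foldl
      (fun d i =>
        let tpl := PySem.List.slice r (some i) (some (i + (1 + (m : Int))))
        d.insert tpl (d.getD tpl 0 + 1)) d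
    = pvCount (pvWin (m + 1) r) d := by
  by_cases hm : m ≤ r.length
  · rw [show (r.length : Int) - (1 + (m : Int)) + 1 = ((r.length - m : Nat) : Int) by omega,
      PySem.List.pyRange_zero_nat, List.foldl_map]
    unfold pvCount pvWin
    rw [show r.length + 1 - (m + 1) = r.length - m by omega, List.foldl_map]
    have hfun : (fun (d : pvDic) (k : Nat) =>
        let tpl := PySem.List.slice r (some (k : Int)) (some ((k : Int) + (1 + (m : Int))))
        d.insert tpl (d.getD tpl 0 + 1)) =
        (fun (d : pvDic) (k : Nat) => pvIncr d ((r.drop k).take (m + 1))) := by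
      funext d k
      rw [show ((k : Int) + (1 + (m : Int))) = ((k : Int) + ((m + 1 : Nat) : Int)) by
        push_cast; ring, PySem.List.slice_natCast_add]
      rfl
    rw [hfun]
  · rw [PySem.List.pyRange_one_eq_nil (by omega)]
    unfold pvWin
    rw [show r.length + 1 - (m + 1) = 0 by omega]
    simp [pvCount]

lemma pvFlushAux (r : List String) (res : List pvDic) (n : Nat) (hres : res.length = n) :
    ∀ m, m ≤ n →
      (List.range m).foldl
        (fun res (k : Nat) =>
          let d := PySem.List.pyGetD res ((1 + (k : Int)) - 1) PySem.Dict.empty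
          let d := (PySem.List.pyRange 0 ((r.length : Int) - (1 + (k : Int)) + 1) 1).foldl
            (fun d i =>
              let tpl := PySem.List.slice r (some i) (some (i + (1 + (k : Int))))
              d.insert tpl (d.getD tpl 0 + 1)) d
          PySem.List.pySetD res ((1 + (k : Int)) - 1) d) res
      = pvBulk (pvWinK r m) res := by
  intro m
  induction m with
  | zero =>
    intro _
    exact (pvBulk_eq_self res (fun j _ => by simp [pvWinK])).symm
  | succ m ih =>
    intro hm
    rw [List.range_succ, List.foldl_append, ih (by omega)]
    simp only [List.foldl_cons, List.foldl_nil]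
    rw [show ((1 + (m : Int)) - 1) = ((m : Nat) : Int) by ring]
    rw [PySem.List.pyGetD_natCast, List.getD_eq_getElem _ _ (by rw [length_pvBulk]; omega),
      getElem_pvBulk, show pvWinK r m m = [] by simp [pvWinK], pvCount_nil]
    rw [pvFlushInner r m]
    rw [PySem.List.pySetD_natCast]
    have hupd := pvBulk_update (pvWinK r m) res m (by omega) (pvWin (m + 1) r)
    rw [show pvWinK r m m = [] by simp [pvWinK], pvCount_nil] at hupd
    rw [hupd]
    apply pvBulk_congr
    intro j hj
    unfold pvWinK
    by_cases hjm : j = m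
    · subst hjm
      rw [if_pos rfl, if_neg (by omega), if_pos (by omega), List.nil_append]
    · rw [if_neg hjm]
      by_cases hj2 : j < m
      · rw [if_pos hj2, if_pos (by omega)]
      · rw [if_neg hj2, if_neg (by omega)]

lemma pvFlush (n : Nat) (r : List String) (res : List pvDic) (hres : res.length = n) :
    pyFlushRun (n : Int) res r = pvBulk (fun j => pvWin (j + 1) r) res := by
  unfold pyFlushRun
  rw [PySem.List.pyRange_one, show ((n : Int) + 1 - 1) = (n : Int) by ring, Int.toNat_natCast,
    List.foldl_map]
  have haux := pvFlushAux r res n hres n le_rfl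
  have hfin : pvBulk (pvWinK r n) res = pvBulk (fun j => pvWin (j + 1) r) res := by
    apply pvBulk_congr
    intro j hj
    simp [pvWinK]
    omega
  rw [← hfin]
  exact haux

lemma pvBfold (n : Nat) :
    ∀ (tokens : List String) (buf : List String) (res : List pvDic), res.length = n →
      tokens.foldl (pvStepB (n : Int)) (res, buf) =
        (pvBulk (pvFlushedK tokens buf) res, pvLastRun tokens buf) := by
  intro tokens
  induction tokens with
  | nil =>
    intro buf res hres
    simp only [List.foldl_nil, pvLastRun]
    refine congrArg₂ Prod.mk ?_ rfl
    exact (pvBulk_eq_self res (fun j _ => by simp [pvFlushedK])).symm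
  | cons t ts ih =>
    intro buf res hres
    simp only [List.foldl_cons]
    by_cases ha : PySem.Str.strIsalpha t
    · rw [show pvStepB (n : Int) (res, buf) t = (res, buf ++ [PySem.Str.lower t]) by
        unfold pvStepB; rw [ha]; rfl]
      rw [ih (buf ++ [PySem.Str.lower t]) res hres]
      refine congrArg₂ Prod.mk ?_ ?_
      · apply pvBulk_congr
        intro j hj
        simp only [pvFlushedK, ha, if_true]
      · simp only [pvLastRun, ha, if_true]
    · have ha' : PySem.Str.strIsalpha t = false := by simpa using ha
      rw [show pvStepB (n : Int) (res, buf) t = (pyFlushRun (n : Int) res buf, []) by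
        unfold pvStepB; rw [ha']; rfl]
      rw [pvFlush n buf res hres]
      rw [ih [] _ (by rw [length_pvBulk]; exact hres)]
      rw [pvBulk_bulk]
      refine congrArg₂ Prod.mk ?_ ?_
      · apply pvBulk_congr
        intro j hj
        simp only [pvFlushedK, ha', Bool.false_eq_true, if_false]
      · simp only [pvLastRun, ha', Bool.false_eq_true, if_false]

lemma pvKeys (j : Nat) :
    ∀ (tokens : List String) (buf : List String),
      pvWin (j + 1) buf ++ pvNewK tokens buf j =
        pvFlushedK tokens buf j ++ pvWin (j + 1) (pvLastRun tokens buf) := by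
  intro tokens
  induction tokens with
  | nil => intro buf; simp [pvNewK, pvFlushedK, pvLastRun]
  | cons t ts ih =>
    intro buf
    by_cases ha : PySem.Str.strIsalpha t
    · simp only [pvNewK, pvFlushedK, pvLastRun, ha, if_true]
      rw [← List.append_assoc, ← pvWin_snoc, ih (buf ++ [PySem.Str.lower t])]
    · simp only [pvNewK, pvFlushedK, pvLastRun, ha, Bool.false_eq_true, if_false]
      rw [List.append_assoc, ← ih ([]), pvWin_nil, List.nil_append]

lemma pvA_noalpha (top_n : Int) :
    ∀ (tokens : List String) (h : List (List String)) (res : List pvDic),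
      (∀ t ∈ tokens, PySem.Str.strIsalpha t = false) →
      (tokens.foldl (pvStepA top_n) (h, res)).2 = res := by
  intro tokens
  induction tokens with
  | nil => intro h res _; rfl
  | cons t ts ih =>
    intro h res hall
    have ha : PySem.Str.strIsalpha t = false := hall t (by simp)
    simp only [List.foldl_cons]
    rw [show pvStepA top_n (h, res) t =
        ((PySem.List.pyRange 0 (top_n - 1) 1).map (fun _ => ([] : List String)), res) by
      unfold pvStepA; rw [ha]; rfl]
    exact ih _ _ (fun t' ht' => hall t' (by simp [ht']))

lemma pvFlush_nonpos {top_n : Int} (h : top_n ≤ 0) (res : List pvDic) (run : List String) :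
    pyFlushRun top_n res run = res := by
  unfold pyFlushRun
  rw [PySem.List.pyRange_one_eq_nil (by omega)]
  rfl

lemma pvB_noalpha {top_n : Int} (htop : top_n ≤ 0) :
    ∀ (tokens : List String) (res : List pvDic) (buf : List String),
      (∀ t ∈ tokens, PySem.Str.strIsalpha t = false) →
      (tokens.foldl (pvStepB top_n) (res, buf)).1 = res := by
  intro tokens
  induction tokens with
  | nil => intro res buf _; rfl
  | cons t ts ih =>
    intro res buf hall
    have ha : PySem.Str.strIsalpha t = false := hall t (by simp)
    simp only [List.foldl_cons]
    rw [show pvStepB top_n (res, buf) t = (pyFlushRun top_n res buf, []) by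
      unfold pvStepB; rw [ha]; rfl]
    rw [pvFlush_nonpos htop]
    exact ih _ _ (fun t' ht' => hall t' (by simp [ht']))

lemma length_pvRes0 (n : Nat) : (pvRes0 (n : Int)).length = n := by
  simp [pvRes0, PySem.List.pyRange_zero_nat]

-- ===== VERDICT (by name: the statement is the Claim_ definition above) =====
theorem multi_ngram_spec : Claim_equal_multi_ngram := by
  unfold Claim_equal_multi_ngram
  intro tokens top_n _hdom hpre
  unfold Spec_multi_ngram
  rw [multi_ngram_eq, multi_ngram_alt_eq]
  by_cases htop : 1 ≤ top_n
  · obtain ⟨n, rfl⟩ : ∃ n : Nat, top_n = (n : Int) :=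
      ⟨top_n.toNat, (Int.toNat_of_nonneg (by omega)).symm⟩
    have hn : 1 ≤ n := by exact_mod_cast htop
    have hr0 : (pvRes0 (n : Int)).length = n := length_pvRes0 n
    rw [pvHist0 n hn, pvAfold n hn tokens [] _ hr0, pvBfold n tokens [] _ hr0]
    rw [pvFlush n _ _ (by rw [length_pvBulk]; exact hr0)]
    rw [pvBulk_bulk]
    congr 1
    apply pvBulk_congr
    intro j hj
    have hk := pvKeys j tokens []
    rw [pvWin_nil, List.nil_append] at hk
    exact hk
  · have hna : ∀ t ∈ tokens, PySem.Str.strIsalpha t = false := hpre.resolve_left htop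
    rw [pvA_noalpha top_n tokens _ _ hna]
    rw [pvFlush_nonpos (by omega), pvB_noalpha (by omega) tokens _ _ hna]
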